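-- pv_equiv track=rewrite | github.com/ZyerTCoder/aoc2021 | 09c.py | part2
-- ===== SOURCE A (Python) =====
-- def findBasinSize(x, y, grid, checked):
--     out = 1
--     for dx, dy in [(0, 1), (1, 0), (0, -1), (-1, 0)]:
--         xx, yy = x + dx, y + dy
--         if 0 <= xx < len(grid) and 0 <= yy < len(grid[1]) and grid[xx][yy] != 9 and checked[xx][yy] == False:
--             checked[xx][yy] = True
--             s, checked = findBasinSize(xx, yy, grid, checked)
--             out += s
--     return out, checked
--
-- def part2(input):
--     ans = 1
--     checked = [[False]*len(input[0]) for i in range(len(input))]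
--     basins = []
--     for x in range(len(input)):
--         for y in range(len(input[0])):
--             if input[x][y] == 9:
--                 checked[x][y] = True
--                 continue
--             if checked[x][y] == False:
--                 checked[x][y] = True
--                 b, checked = findBasinSize(x, y, input, checked)
--                 if b:
--                     basins.append(b)
--     for _ in range(3):
--         ans *= basins.pop(basins.index(max(basins)))
--     return ans
-- ===== SOURCE B (Python) =====
-- def part2(input):
--     rows, cols = len(input), len(input[0])
--     seen = set()
--     basins = []
--     for x in range(rows):
--         for y in range(cols):
--             if input[x][y] != 9 and (x, y) not in seen:
--                 seen.add((x, y))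
--                 queue = [(x, y)]
--                 qi = 0
--                 while qi < len(queue):
--                     cx, cy = queue[qi]
--                     qi += 1
--                     for n in ((cx, cy + 1), (cx + 1, cy), (cx, cy - 1), (cx - 1, cy)):
--                         if 0 <= n[0] < rows and 0 <= n[1] < cols and input[n[0]][n[1]] != 9 and n not in seen:
--                             seen.add(n)
--                             queue.append(n)
--                 basins.append(len(queue))
--     m1 = max(basins); basins.remove(m1)
--     m2 = max(basins); basins.remove(m2)
--     m3 = max(basins)
--     return m1 * m2 * m3
-- ===== Notes on version B (the rewrite author's own statement) =====
-- stated objective: alternative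
-- what changed: A's recursive flood fill over a 2-d boolean checked matrix becomes an index-pointer BFS over a set of coordinates (size = final queue length, no checked matrix, 9-cells never marked), and the three-largest extraction is unrolled into max/remove steps instead of A's pop(index(max)) loop.
-- outside the precondition, e.g. on part2([[9, 1, 9, 2, 9], [9, 9, 9, 9, 9], [9, 3, 9, 9, 9, 77]]): A returns 1, B returns 1
import Mathlib
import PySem

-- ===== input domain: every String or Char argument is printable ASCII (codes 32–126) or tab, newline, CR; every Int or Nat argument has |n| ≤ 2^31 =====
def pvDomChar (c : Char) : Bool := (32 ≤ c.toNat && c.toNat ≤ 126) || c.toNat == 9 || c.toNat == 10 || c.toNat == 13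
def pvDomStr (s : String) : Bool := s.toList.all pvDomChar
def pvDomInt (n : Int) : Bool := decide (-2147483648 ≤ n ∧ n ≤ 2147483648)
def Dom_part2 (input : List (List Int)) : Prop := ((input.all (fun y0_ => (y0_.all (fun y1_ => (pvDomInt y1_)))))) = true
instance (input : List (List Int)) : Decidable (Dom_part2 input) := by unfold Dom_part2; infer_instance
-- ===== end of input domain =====

-- B replaces A's recursive flood fill over a 2-d boolean "checked" matrix by an index-pointer BFS
-- over a set of coordinates (basin size = final queue length; 9-cells are never marked) and unrolls
-- the three-largest extraction into max/remove steps; objective: alternative algorithmic decomposition.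
-- (Neither version mutates its argument; A's `checked` matrix is internal.)


-- ===== PORT A =====
-- A's grid / checked-matrix accessors (every use sits behind the same bounds guard the Python
-- performs, so plain `getD` indexing is exact there)
def gA (g : List (List Int)) (i j : Int) : Int := (g.getD i.toNat []).getD j.toNat 0
def getB (ch : List (List Bool)) (i j : Int) : Bool :=
  if 0 ≤ i ∧ 0 ≤ j then (ch.getD i.toNat []).getD j.toNat false else false
def setB (ch : List (List Bool)) (i j : Int) : List (List Bool) :=
  ch.modify i.toNat (fun r => r.set j.toNat true)
def deltas : List (Int × Int) := [(0, 1), (1, 0), (0, -1), (-1, 0)]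

-- one neighbour step of A's `findBasinSize` for-loop (rec = the recursive call one fuel lower)
def aStep (g : List (List Int)) (rec : Int → Int → List (List Bool) → Int × List (List Bool))
    (x y : Int) (st : Int × List (List Bool)) (d : Int × Int) : Int × List (List Bool) :=
  let xx := x + d.1
  let yy := y + d.2
  if 0 ≤ xx ∧ xx < (g.length : Int) ∧ 0 ≤ yy ∧ yy < ((g.getD 1 []).length : Int) ∧
      gA g xx yy ≠ 9 ∧ getB st.2 xx yy = false then
    let r := rec xx yy (setB st.2 xx yy)
    (st.1 + r.1, r.2)
  else st

-- A's findBasinSize; fuel only makes the recursion total and never runs out on the calls part2 makes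
def part2_dfs (g : List (List Int)) : Nat → Int → Int → List (List Bool) → Int × List (List Bool)
  | 0, _, _, ch => (1, ch)
  | fuel + 1, x, y, ch => deltas.foldl (aStep g (part2_dfs g fuel) x y) (1, ch)

-- A's final step `for _ in range(3): ans *= basins.pop(basins.index(max(basins)))`
-- (Python raises ValueError on fewer than 3 basins; those inputs are outside Pre_part2)
def top3 (basins : List Int) : Int :=
  ((List.range 3).foldl (fun p _ =>
    match PySem.List.max? p.2 (fun v => v) with
    | none => p
    | some m =>
      match PySem.List.index? p.2 m with
      | none => p
      | some i =>
        match PySem.List.pop? p.2 (i : Int) with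
        | none => p
        | some vr => (p.1 * vr.1, vr.2)) ((1 : Int), basins)).1

def part2 (input : List (List Int)) : Int :=
  let rows := input.length
  let cols := (input.getD 0 []).length
  let st := (List.range rows).foldl (fun st x => (List.range cols).foldl (fun st y =>
      if gA input x y = 9 then (setB st.1 x y, st.2)
      else if getB st.1 x y = false then
        let ch1 := setB st.1 x y
        let r := part2_dfs input (rows * cols + 1) x y ch1
        (r.2, if r.1 ≠ 0 then st.2 ++ [r.1] else st.2)
      else st) st)
    (List.replicate rows (List.replicate cols false), ([] : List Int))
  top3 st.2

-- ===== PORT B =====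
-- B's grid accessor takes the coordinate pair (guarded by the same bounds checks as the Python)
def cellAt (g : List (List Int)) (p : Int × Int) : Int := (g.getD p.1.toNat []).getD p.2.toNat 0
-- the four neighbour coordinates B's inner for-loop iterates over
def nbrsOf (c : Int × Int) : List (Int × Int) :=
  [(c.1, c.2 + 1), (c.1 + 1, c.2), (c.1, c.2 - 1), (c.1 - 1, c.2)]

-- one neighbour of B's inner for-loop: state = (queue, seen)
def bNbr (rows cols : Int) (g : List (List Int))
    (st : List (Int × Int) × PySem.Set (Int × Int)) (n : Int × Int) :
    List (Int × Int) × PySem.Set (Int × Int) :=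
  if 0 ≤ n.1 ∧ n.1 < rows ∧ 0 ≤ n.2 ∧ n.2 < cols ∧ cellAt g n ≠ 9 ∧ n ∉ st.2 then
    (st.1 ++ [n], PySem.Set.add st.2 n)
  else st

-- B's `while qi < len(queue):` loop; fuel only makes it total and never runs out on part2_alt's calls
def bfs (rows cols : Int) (g : List (List Int)) :
    Nat → List (Int × Int) → Nat → PySem.Set (Int × Int) →
    List (Int × Int) × PySem.Set (Int × Int)
  | 0, queue, _, seen => (queue, seen)
  | fuel + 1, queue, qi, seen =>
    if qi < queue.length then
      let st := (nbrsOf (queue.getD qi (0, 0))).foldl (bNbr rows cols g) (queue, seen)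
      bfs rows cols g fuel st.1 (qi + 1) st.2
    else (queue, seen)

-- B's `m = max(basins); basins.remove(m)` (Python raises ValueError on an empty list;
-- inside Pre_part2 there are always at least 3 basins, so those arms are never taken)
def takeMax (l : List Int) : Int × List Int :=
  match PySem.List.max? l (fun v => v) with
  | none => (1, l)
  | some m => (m, (PySem.List.remove? l m).getD l)

def part2_alt (input : List (List Int)) : Int :=
  let rows := input.length
  let cols := (input.getD 0 []).length
  let st := (List.range rows).foldl (fun st x => (List.range cols).foldl (fun st y =>
      if cellAt input ((x : Int), (y : Int)) ≠ 9 ∧ ((x : Int), (y : Int)) ∉ st.2 then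
        let r := bfs (rows : Int) (cols : Int) input (rows * cols + 1)
          [((x : Int), (y : Int))] 0 (PySem.Set.add st.2 ((x : Int), (y : Int)))
        (st.1 ++ [(r.1.length : Int)], r.2)
      else st) st)
    (([] : List Int), (PySem.Set.empty : PySem.Set (Int × Int)))
  let r1 := takeMax st.1
  let r2 := takeMax r1.2
  let m3 := match PySem.List.max? r2.2 (fun v => v) with
    | none => (1 : Int)
    | some m => m
  r1.1 * r2.1 * m3

-- ===== PRECONDITION & SPEC =====
-- self-contained connected-component counter used only by Pre_ (incremental component merging,
-- independent of either port's flood fill)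
def preGood (g : List (List Int)) (c : Nat × Nat) : Bool :=
  c.1 < g.length && c.2 < (g.getD 0 []).length && (g.getD c.1 []).getD c.2 0 != 9
def preAdj (c d : Nat × Nat) : Bool :=
  (c.1 = d.1 && (c.2 + 1 = d.2 || d.2 + 1 = c.2)) || (c.2 = d.2 && (c.1 + 1 = d.1 || d.1 + 1 = c.1))
def preBasins (g : List (List Int)) : Nat :=
  (((List.range g.length).flatMap (fun x => (List.range (g.getD 0 []).length).map (fun y => (x, y)))).filter
      (preGood g)).foldl
    (fun comps c =>
      let touching := comps.filter (fun comp => comp.any (preAdj c))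
      let other := comps.filter (fun comp => !comp.any (preAdj c))
      (c :: touching.flatten) :: other)
    ([] : List (List (Nat × Nat))) |>.length

-- Pre_ excludes: grids with fewer than 2 rows (A's `len(grid[1])` raises IndexError or, with every
-- cell a 9, max of the empty basin list raises ValueError), ragged grids (A raises on them except when the extra/short
-- columns are walled off by 9s, where A agrees with B anyway — see the cite), and grids with fewer
-- than 3 basins (`max`/`pop` raise ValueError).
def Pre_part2 (input : List (List Int)) : Prop :=
  2 ≤ input.length ∧ (∀ r ∈ input, r.length = (input.getD 0 []).length) ∧ 3 ≤ preBasins input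
instance (input : List (List Int)) : Decidable (Pre_part2 input) := by unfold Pre_part2; infer_instance

def pvWitness_part2 : List (List Int) := [[9, 1, 9], [2, 9, 3]]

def Spec_part2 (input : List (List Int)) (out : Int) : Prop := out = part2_alt input
instance (input : List (List Int)) (out : Int) : Decidable (Spec_part2 input out) := by unfold Spec_part2; infer_instance

-- ===== CLAIM (what is proved, stated in full; the proofs are below) =====
def Claim_equal_part2 : Prop := ∀ (input : List (List Int)), Dom_part2 input → Pre_part2 input → Spec_part2 input (part2 input)

-- ===== LEMMAS AND PROOFS =====

-- shape of a checked matrix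
def Shp (ch : List (List Bool)) (R C : Nat) : Prop := ch.length = R ∧ ∀ r ∈ ch, r.length = C
-- number of unmarked cells
def cnt (ch : List (List Bool)) : Nat := (ch.map (fun r => r.count false)).sum
-- a good (in-bounds, non-9) cell w.r.t. column bound C
def goodc (g : List (List Int)) (C : Nat) (c : Int × Int) : Prop :=
  0 ≤ c.1 ∧ c.1 < (g.length : Int) ∧ 0 ≤ c.2 ∧ c.2 < (C : Int) ∧ gA g c.1 c.2 ≠ 9
-- one A-flood step into an unmarked good cell
def relc (g : List (List Int)) (C : Nat) (ch : List (List Bool)) (c d : Int × Int) : Prop :=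
  d ∈ nbrsOf c ∧ goodc g C d ∧ getB ch d.1 d.2 = false
-- A-side reachability through unmarked good cells
def Reach (g : List (List Int)) (C : Nat) (ch : List (List Bool)) (s c : Int × Int) : Prop :=
  Relation.ReflTransGen (relc g C ch) s c
-- one B-flood step into an unseen good cell
def relS (g : List (List Int)) (C : Nat) (seen : List (Int × Int)) (c d : Int × Int) : Prop :=
  d ∈ nbrsOf c ∧ goodc g C d ∧ d ∉ seen
-- B-side reachability through unseen good cells
def ReachS (g : List (List Int)) (C : Nat) (seen : List (Int × Int)) (s c : Int × Int) : Prop :=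
  Relation.ReflTransGen (relS g C seen) s c

theorem cellAt_eq (g : List (List Int)) (p : Int × Int) : cellAt g p = gA g p.1 p.2 := rfl

-- ---- basic grid lemmas ----

theorem getB_neg {ch : List (List Bool)} {a b : Int} (h : ¬(0 ≤ a ∧ 0 ≤ b)) :
    getB ch a b = false := by simp [getB, h]

theorem shp_getD {ch : List (List Bool)} {R C : Nat} (h : Shp ch R C) {n : Nat} (hn : n < R) :
    (ch.getD n []).length = C := by
  have hn' : n < ch.length := by rw [h.1]; exact hn
  rw [List.getD_eq_getElem _ _ hn']
  exact h.2 _ (List.getElem_mem hn')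

theorem shp_setB {ch : List (List Bool)} {R C : Nat} (h : Shp ch R C) (i j : Int) :
    Shp (setB ch i j) R C := by
  refine ⟨by simpa [setB] using h.1, ?_⟩
  intro r hr
  rcases List.mem_iff_getElem.1 hr with ⟨k, hk, hkr⟩
  have hk' : k < ch.length := by simpa [setB] using hk
  unfold setB at hkr
  rw [List.getElem_modify] at hkr
  subst hkr
  split
  · simpa using h.2 _ (List.getElem_mem hk')
  · exact h.2 _ (List.getElem_mem hk')

theorem getB_setB {ch : List (List Bool)} {i j : Int} (hi0 : 0 ≤ i) (hj0 : 0 ≤ j)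
    (hiR : i.toNat < ch.length) (hjC : j.toNat < (ch.getD i.toNat []).length) (a b : Int) :
    getB (setB ch i j) a b = (decide (a = i ∧ b = j) || getB ch a b) := by
  by_cases h0 : 0 ≤ a ∧ 0 ≤ b
  · have hlen : (setB ch i j).length = ch.length := by simp [setB]
    by_cases haR : a.toNat < ch.length
    · have hget : (setB ch i j).getD a.toNat [] =
          if i.toNat = a.toNat then (ch.getD a.toNat []).set j.toNat true
          else ch.getD a.toNat [] := by
        rw [setB, List.getD_eq_getElem _ _ (by simpa [setB] using haR),
          List.getElem_modify]
        split
        · rw [List.getD_eq_getElem _ _ haR]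
        · rw [List.getD_eq_getElem _ _ haR]
      by_cases hia : a = i
      · subst hia
        rw [getB, getB, if_pos h0, if_pos h0, hget, if_pos rfl]
        by_cases hjb : b = j
        · subst hjb
          rw [List.getD_eq_getElem _ _ (by simpa using hjC), List.getElem_set_self]
          simp
        · have : b.toNat ≠ j.toNat := by omega
          rw [List.getD_eq_getElem?_getD, List.getElem?_set_ne (by omega),
            ← List.getD_eq_getElem?_getD]
          simp [hjb]
      · have : i.toNat ≠ a.toNat := by omega
        rw [getB, getB, if_pos h0, if_pos h0, hget, if_neg this]
        simp [hia]
    · have h1 : (setB ch i j).getD a.toNat [] = [] := by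
        rw [List.getD_eq_getElem?_getD, List.getElem?_eq_none (by simpa [setB] using haR)]
        rfl
      have h2 : ch.getD a.toNat [] = [] := by
        rw [List.getD_eq_getElem?_getD, List.getElem?_eq_none (by omega)]
        rfl
      have hia : a ≠ i := by omega
      rw [getB, getB, if_pos h0, if_pos h0, h1, h2]
      simp [hia]
  · rw [getB_neg h0, getB_neg h0]
    have : ¬(a = i ∧ b = j) := by rintro ⟨rfl, rfl⟩; exact h0 ⟨hi0, hj0⟩
    simp [this]

theorem getB_true_bounds {ch : List (List Bool)} {a b : Int} (h : getB ch a b = true) :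
    0 ≤ a ∧ 0 ≤ b ∧ a.toNat < ch.length ∧ b.toNat < (ch.getD a.toNat []).length := by
  by_cases h0 : 0 ≤ a ∧ 0 ≤ b
  · rw [getB, if_pos h0] at h
    by_cases haR : a.toNat < ch.length
    · by_cases hbC : b.toNat < (ch.getD a.toNat []).length
      · exact ⟨h0.1, h0.2, haR, hbC⟩
      · rw [List.getD_eq_getElem?_getD, List.getElem?_eq_none (by omega)] at h
        simp at h
    · have hnil : ch.getD a.toNat [] = [] := by
        rw [List.getD_eq_getElem?_getD, List.getElem?_eq_none (by omega)]
        rfl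
      rw [hnil] at h
      simp at h
  · rw [getB_neg h0] at h; cases h

theorem count_false_set {r : List Bool} {j : Nat} (hj : j < r.length) (h : r[j] = false) :
    (r.set j true).count false + 1 = r.count false := by
  conv_rhs => rw [← List.take_append_drop j r, List.drop_eq_getElem_cons hj, h]
  rw [List.set_eq_take_append_cons_drop, if_pos hj]
  simp [List.count_append]
  omega

theorem cnt_append (l₁ l₂ : List (List Bool)) : cnt (l₁ ++ l₂) = cnt l₁ + cnt l₂ := by
  simp [cnt]

theorem cnt_setB {ch : List (List Bool)} {i j : Int} (hi0 : 0 ≤ i) (hj0 : 0 ≤ j)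
    (hiR : i.toNat < ch.length) (hjC : j.toNat < (ch.getD i.toNat []).length)
    (hgb : getB ch i j = false) :
    cnt (setB ch i j) + 1 = cnt ch := by
  have hrow : (ch.getD i.toNat [])[j.toNat] = false := by
    rw [getB, if_pos ⟨hi0, hj0⟩] at hgb
    rwa [← List.getD_eq_getElem _ false hjC]
  have hmod : setB ch i j =
      ch.take i.toNat ++ ((ch.getD i.toNat []).set j.toNat true) :: ch.drop (i.toNat + 1) := by
    rw [setB, List.modify_eq_set_getElem?, List.getElem?_eq_getElem hiR]
    show ch.set i.toNat (ch[i.toNat].set j.toNat true) = _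
    rw [List.set_eq_take_append_cons_drop, if_pos hiR, List.getD_eq_getElem _ _ hiR]
  conv_rhs => rw [← List.take_append_drop i.toNat ch, List.drop_eq_getElem_cons hiR]
  rw [hmod, cnt_append, cnt_append]
  have : cnt (((ch.getD i.toNat []).set j.toNat true) :: ch.drop (i.toNat + 1)) + 1 =
      cnt (ch[i.toNat] :: ch.drop (i.toNat + 1)) := by
    have h2 := count_false_set hjC hrow
    simp only [cnt, List.map_cons, List.sum_cons, List.getD_eq_getElem _ _ hiR] at h2 ⊢
    omega
  omega

theorem cnt_le {ch : List (List Bool)} {R C : Nat} (h : Shp ch R C) : cnt ch ≤ R * C := by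
  induction ch generalizing R with
  | nil => simp [cnt]
  | cons r t ih =>
    obtain ⟨h1, h2⟩ := h
    have ht : Shp t (t.length) C := ⟨rfl, fun s hs => h2 s (List.mem_cons_of_mem _ hs)⟩
    have hr : r.count false ≤ C := by
      calc r.count false ≤ r.length := List.count_le_length
        _ = C := h2 r List.mem_cons_self
    have := ih ht
    have hR : R = t.length + 1 := by simpa using h1.symm
    subst hR
    simp only [cnt, List.map_cons, List.sum_cons] at *
    nlinarith

theorem chExt {ch₁ ch₂ : List (List Bool)} {R C : Nat} (h1 : Shp ch₁ R C) (h2 : Shp ch₂ R C)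
    (h : ∀ a b : Int, getB ch₁ a b = getB ch₂ a b) : ch₁ = ch₂ := by
  apply List.ext_getElem (by rw [h1.1, h2.1])
  intro i hi1 hi2
  apply List.ext_getElem
  · rw [h1.2 _ (List.getElem_mem hi1), h2.2 _ (List.getElem_mem hi2)]
  intro j hj1 hj2
  have hkey := h (i : Int) (j : Int)
  rw [getB, getB, if_pos ⟨Int.natCast_nonneg i, Int.natCast_nonneg j⟩,
    if_pos ⟨Int.natCast_nonneg i, Int.natCast_nonneg j⟩, Int.toNat_natCast, Int.toNat_natCast,
    List.getD_eq_getElem _ _ hi1, List.getD_eq_getElem _ _ hi2,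
    List.getD_eq_getElem _ _ hj1, List.getD_eq_getElem _ _ hj2] at hkey
  exact hkey

theorem reach_mono {g : List (List Int)} {C : Nat} {ch ch' : List (List Bool)}
    (hm : ∀ a b, getB ch a b = true → getB ch' a b = true) {s c : Int × Int}
    (h : Reach g C ch' s c) : Reach g C ch s c := by
  refine Relation.ReflTransGen.mono (fun a b hab => ⟨hab.1, hab.2.1, ?_⟩) h
  cases h2 : getB ch b.1 b.2 with
  | false => rfl
  | true => exact absurd (hm _ _ h2) (by simp [hab.2.2])

theorem reachS_mono {g : List (List Int)} {C : Nat} {seen seen' : List (Int × Int)}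
    (hm : ∀ p ∈ seen, p ∈ seen') {s c : Int × Int}
    (h : ReachS g C seen' s c) : ReachS g C seen s c := by
  refine Relation.ReflTransGen.mono (fun a b hab => ⟨hab.1, hab.2.1, fun hb => ?_⟩) h
  exact hab.2.2 (hm _ hb)

theorem mem_nbrs_iff {x y : Int} (d : Int × Int) :
    d ∈ nbrsOf (x, y) ↔ ∃ δ ∈ deltas, d = (x + δ.1, y + δ.2) := by
  simp only [nbrsOf, deltas, List.mem_cons]
  constructor
  · rintro (rfl | rfl | rfl | rfl | h)
    · exact ⟨(0, 1), Or.inl rfl, by simp⟩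
    · exact ⟨(1, 0), Or.inr (Or.inl rfl), by simp⟩
    · exact ⟨(0, -1), Or.inr (Or.inr (Or.inl rfl)), by simp [Prod.ext_iff]; ring⟩
    · exact ⟨(-1, 0), Or.inr (Or.inr (Or.inr (Or.inl rfl))), by simp [Prod.ext_iff]; ring⟩
    · cases h
  · rintro ⟨δ, (rfl | rfl | rfl | rfl | h), rfl⟩
    · simp
    · simp
    · refine Or.inr (Or.inr (Or.inl ?_)); simp [Prod.ext_iff]; ring
    · refine Or.inr (Or.inr (Or.inr (Or.inl ?_))); simp [Prod.ext_iff]; ring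
    · cases h

-- the step relations coincide on a matrix and a set that agree on good cells
theorem reach_iff_reachS {g : List (List Int)} {C : Nat} {ch : List (List Bool)}
    {seen : List (Int × Int)}
    (hcorr : ∀ p : Int × Int, goodc g C p → (getB ch p.1 p.2 = true ↔ p ∈ seen))
    {s : Int × Int} (c : Int × Int) : Reach g C ch s c ↔ ReachS g C seen s c := by
  constructor
  · refine Relation.ReflTransGen.mono (fun a b hab => ⟨hab.1, hab.2.1, fun hb => ?_⟩)
    have h3 := (hcorr b hab.2.1).2 hb
    have h4 := hab.2.2
    rw [h3] at h4
    cases h4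
  · refine Relation.ReflTransGen.mono (fun a b hab => ⟨hab.1, hab.2.1, ?_⟩)
    cases h2 : getB ch b.1 b.2 with
    | false => rfl
    | true => exact absurd ((hcorr b hab.2.1).1 h2) hab.2.2

theorem reach_good {g : List (List Int)} {C : Nat} {ch : List (List Bool)} {s c : Int × Int}
    (h : Reach g C ch s c) : c = s ∨ goodc g C c := by
  induction h with
  | refl => exact Or.inl rfl
  | tail _ h2 _ => exact Or.inr h2.2.1

-- ---- A side: specification of the recursive flood fill ----

def AInv (g : List (List Int)) (C R : Nat) (x y : Int) (ch : List (List Bool))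
    (st : Int × List (List Bool)) : Prop :=
  Shp st.2 R C ∧
  (∀ a b, getB ch a b = true → getB st.2 a b = true) ∧
  cnt st.2 ≤ cnt ch ∧
  st.1 + (cnt st.2 : Int) = 1 + (cnt ch : Int) ∧
  (∀ c : Int × Int, getB st.2 c.1 c.2 = true → getB ch c.1 c.2 = false → Reach g C ch (x, y) c) ∧
  (∀ c : Int × Int, getB st.2 c.1 c.2 = true → getB ch c.1 c.2 = false →
     ∀ d ∈ nbrsOf c, goodc g C d → getB st.2 d.1 d.2 = true)

def ASpec (g : List (List Int)) (C R : Nat) (x y : Int) (ch : List (List Bool))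
    (r : Int × List (List Bool)) : Prop :=
  Shp r.2 R C ∧
  (∀ a b, getB ch a b = true → getB r.2 a b = true) ∧
  cnt r.2 ≤ cnt ch ∧
  r.1 + (cnt r.2 : Int) = 1 + (cnt ch : Int) ∧
  (∀ c : Int × Int, getB r.2 c.1 c.2 = true → getB ch c.1 c.2 = false → Reach g C ch (x, y) c) ∧
  (∀ d ∈ nbrsOf (x, y), goodc g C d → getB r.2 d.1 d.2 = true) ∧
  (∀ c : Int × Int, getB r.2 c.1 c.2 = true → getB ch c.1 c.2 = false →
     ∀ d ∈ nbrsOf c, goodc g C d → getB r.2 d.1 d.2 = true)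

theorem aStep_spec (g : List (List Int)) (C R : Nat) (hR : R = g.length)
    (hC : (g.getD 1 []).length = C) (fuel : Nat) (x y : Int) (ch : List (List Bool))
    (IH : ∀ x' y' ch', Shp ch' R C → cnt ch' < fuel → getB ch' x' y' = true →
      ASpec g C R x' y' ch' (part2_dfs g fuel x' y' ch'))
    (hcnt : cnt ch < fuel + 1) (d : Int × Int) (st : Int × List (List Bool))
    (hd : (x + d.1, y + d.2) ∈ nbrsOf (x, y)) (hst : AInv g C R x y ch st) :
    AInv g C R x y ch (aStep g (part2_dfs g fuel) x y st d) ∧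
    (∀ a b, getB st.2 a b = true → getB (aStep g (part2_dfs g fuel) x y st d).2 a b = true) ∧
    (goodc g C (x + d.1, y + d.2) →
      getB (aStep g (part2_dfs g fuel) x y st d).2 (x + d.1) (y + d.2) = true) := by
  obtain ⟨hShp, hmono, hle, hcount, hsound, hclosed⟩ := hst
  by_cases hg : 0 ≤ x + d.1 ∧ x + d.1 < (g.length : Int) ∧ 0 ≤ y + d.2 ∧
      y + d.2 < ((g.getD 1 []).length : Int) ∧ gA g (x + d.1) (y + d.2) ≠ 9 ∧
      getB st.2 (x + d.1) (y + d.2) = false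
  · have hstep : aStep g (part2_dfs g fuel) x y st d =
        (st.1 + (part2_dfs g fuel (x + d.1) (y + d.2) (setB st.2 (x + d.1) (y + d.2))).1,
         (part2_dfs g fuel (x + d.1) (y + d.2) (setB st.2 (x + d.1) (y + d.2))).2) := by
      simp only [aStep]; rw [if_pos hg]
    obtain ⟨hx0, hxR, hy0, hyC, h9, hunm⟩ := hg
    have hgood : goodc g C (x + d.1, y + d.2) := ⟨hx0, hxR, hy0, by rwa [hC] at hyC, h9⟩
    have hiR : (x + d.1).toNat < st.2.length := by rw [hShp.1, hR]; omega
    have hjC : (y + d.2).toNat < (st.2.getD (x + d.1).toNat []).length := by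
      rw [shp_getD hShp (by rw [hR]; omega)]; omega
    have hset := getB_setB hx0 hy0 hiR hjC
    have hcntset := cnt_setB hx0 hy0 hiR hjC hunm
    have hShp2 := shp_setB hShp (x + d.1) (y + d.2)
    have hmono2 : ∀ a b, getB st.2 a b = true → getB (setB st.2 (x + d.1) (y + d.2)) a b = true := by
      intro a b hab; rw [hset]; simp [hab]
    have hstart : getB (setB st.2 (x + d.1) (y + d.2)) (x + d.1) (y + d.2) = true := by
      rw [hset]; simp
    have hunm_ch : getB ch (x + d.1) (y + d.2) = false := by
      cases hc : getB ch (x + d.1) (y + d.2) with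
      | false => rfl
      | true => exact absurd (hmono _ _ hc) (by simp [hunm])
    have hrel : relc g C ch (x, y) (x + d.1, y + d.2) := ⟨hd, hgood, hunm_ch⟩
    have S := IH (x + d.1) (y + d.2) (setB st.2 (x + d.1) (y + d.2)) hShp2 (by omega) hstart
    rcases hr : part2_dfs g fuel (x + d.1) (y + d.2) (setB st.2 (x + d.1) (y + d.2)) with ⟨n, ch'⟩
    rw [hr] at hstep S
    rw [hstep]
    obtain ⟨sShp, smono, sle, scount, ssound, sclosed1, sclosed2⟩ := S
    dsimp only at sShp smono sle scount ssound sclosed1 sclosed2 ⊢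
    have hmono3 : ∀ a b, getB st.2 a b = true → getB ch' a b = true :=
      fun a b hab => smono a b (hmono2 a b hab)
    refine ⟨⟨sShp, fun a b hab => hmono3 a b (hmono a b hab),
      by show cnt ch' ≤ cnt ch; omega,
      by show st.1 + n + (cnt ch' : Int) = 1 + (cnt ch : Int); omega,
      ?_, ?_⟩, hmono3, fun _ => smono _ _ hstart⟩
    · -- soundness
      intro c hc hcch
      by_cases h1 : getB st.2 c.1 c.2 = true
      · exact hsound c h1 hcch
      · by_cases h2 : getB (setB st.2 (x + d.1) (y + d.2)) c.1 c.2 = true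
        · have : c = (x + d.1, y + d.2) := by
            rw [hset] at h2; simp [h1] at h2
            exact Prod.ext h2.1 h2.2
          subst this
          exact Relation.ReflTransGen.single hrel
        · have hreach := ssound c hc (by cases h3 : getB (setB st.2 (x + d.1) (y + d.2)) c.1 c.2 with
            | false => rfl
            | true => exact absurd h3 h2)
          have : Reach g C ch (x + d.1, y + d.2) c :=
            reach_mono (fun a b hab => hmono2 a b (hmono a b hab)) hreach
          exact Relation.ReflTransGen.head hrel this
    · -- closedness
      intro c hc hcch e he hge
      by_cases h1 : getB st.2 c.1 c.2 = true
      · exact hmono3 _ _ (hclosed c h1 hcch e he hge)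
      · by_cases h2 : getB (setB st.2 (x + d.1) (y + d.2)) c.1 c.2 = true
        · have : c = (x + d.1, y + d.2) := by
            rw [hset] at h2; simp [h1] at h2
            exact Prod.ext h2.1 h2.2
          subst this
          exact sclosed1 e he hge
        · exact sclosed2 c hc (by cases h3 : getB (setB st.2 (x + d.1) (y + d.2)) c.1 c.2 with
            | false => rfl
            | true => exact absurd h3 h2) e he hge
  · have hstep : aStep g (part2_dfs g fuel) x y st d = st := by
      simp only [aStep]; rw [if_neg hg]
    rw [hstep]
    refine ⟨⟨hShp, hmono, hle, hcount, hsound, hclosed⟩, fun _ _ h => h, ?_⟩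
    intro hgood
    obtain ⟨hx0, hxR, hy0, hyC, h9⟩ := hgood
    cases hm : getB st.2 (x + d.1) (y + d.2) with
    | true => rfl
    | false => exact absurd ⟨hx0, hxR, hy0, by rw [hC]; exact hyC, h9, hm⟩ hg

theorem foldA (g : List (List Int)) (C R : Nat) (hR : R = g.length)
    (hC : (g.getD 1 []).length = C) (fuel : Nat) (x y : Int) (ch : List (List Bool))
    (IH : ∀ x' y' ch', Shp ch' R C → cnt ch' < fuel → getB ch' x' y' = true →
      ASpec g C R x' y' ch' (part2_dfs g fuel x' y' ch'))
    (hcnt : cnt ch < fuel + 1) :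
    ∀ (ds : List (Int × Int)) (st : Int × List (List Bool)),
      (∀ d ∈ ds, (x + d.1, y + d.2) ∈ nbrsOf (x, y)) →
      AInv g C R x y ch st →
      AInv g C R x y ch (ds.foldl (aStep g (part2_dfs g fuel) x y) st) ∧
      (∀ a b, getB st.2 a b = true →
        getB (ds.foldl (aStep g (part2_dfs g fuel) x y) st).2 a b = true) ∧
      (∀ d ∈ ds, goodc g C (x + d.1, y + d.2) →
        getB (ds.foldl (aStep g (part2_dfs g fuel) x y) st).2 (x + d.1) (y + d.2) = true) := by
  intro ds
  induction ds with
  | nil => exact fun st _ hst => ⟨hst, fun _ _ h => h, by simp⟩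
  | cons d ds ih =>
    intro st hds hst
    have h1 := aStep_spec g C R hR hC fuel x y ch IH hcnt d st
      (hds d List.mem_cons_self) hst
    have h2 := ih (aStep g (part2_dfs g fuel) x y st d)
      (fun e he => hds e (List.mem_cons_of_mem _ he)) h1.1
    refine ⟨h2.1, fun a b hab => h2.2.1 a b (h1.2.1 a b hab), ?_⟩
    intro e he hge
    rcases List.mem_cons.1 he with rfl | he'
    · exact h2.2.1 _ _ (h1.2.2 hge)
    · exact h2.2.2 e he' hge

theorem dfs_main (g : List (List Int)) (C R : Nat) (hR : R = g.length)
    (hC : (g.getD 1 []).length = C) :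
    ∀ (fuel : Nat) (x y : Int) (ch : List (List Bool)), Shp ch R C → cnt ch < fuel →
      getB ch x y = true → ASpec g C R x y ch (part2_dfs g fuel x y ch) := by
  intro fuel
  induction fuel with
  | zero => intro x y ch _ hcnt _; omega
  | succ fuel ih =>
    intro x y ch hShp hcnt hxy
    rw [part2_dfs]
    have hds : ∀ d ∈ deltas, (x + d.1, y + d.2) ∈ nbrsOf (x, y) := by
      intro d hd
      exact (mem_nbrs_iff _).2 ⟨d, hd, rfl⟩
    have h0 : AInv g C R x y ch (1, ch) := by
      refine ⟨hShp, fun _ _ h => h, le_refl _, rfl, ?_, ?_⟩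
      · intro c hc hcc; rw [hc] at hcc; cases hcc
      · intro c hc hcc; rw [hc] at hcc; cases hcc
    have h := foldA g C R hR hC fuel x y ch ih (by omega) deltas (1, ch) hds h0
    obtain ⟨⟨iShp, imono, ile, icount, isound, iclosed⟩, _, itargets⟩ := h
    refine ⟨iShp, imono, ile, icount, isound, ?_, iclosed⟩
    intro d hd hg
    rcases (mem_nbrs_iff d).1 hd with ⟨δ, hδ, rfl⟩
    exact itargets δ hδ hg

theorem dfs_points (g : List (List Int)) (C R : Nat) (hR : R = g.length)
    (hC : (g.getD 1 []).length = C) (fuel : Nat) (x y : Int) (ch : List (List Bool))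
    (hShp : Shp ch R C) (hcnt : cnt ch < fuel) (hxy : getB ch x y = true) :
    ∀ c : Int × Int, getB (part2_dfs g fuel x y ch).2 c.1 c.2 = true ↔
      (getB ch c.1 c.2 = true ∨ Reach g C ch (x, y) c) := by
  obtain ⟨_, imono, _, _, isound, iclosed1, iclosed2⟩ := dfs_main g C R hR hC fuel x y ch hShp hcnt hxy
  have key : ∀ c : Int × Int, Reach g C ch (x, y) c →
      getB (part2_dfs g fuel x y ch).2 c.1 c.2 = true ∧
      ((x, y) = c ∨ getB ch c.1 c.2 = false) := by
    intro c h
    induction h with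
    | refl => exact ⟨imono _ _ hxy, Or.inl rfl⟩
    | tail h1 h2 ih =>
      rename_i b c'
      refine ⟨?_, Or.inr h2.2.2⟩
      rcases ih.2 with hb | hb
      · exact iclosed1 c' (by rw [← hb] at h2; exact h2.1) h2.2.1
      · exact iclosed2 b ih.1 hb c' h2.1 h2.2.1
  intro c
  constructor
  · intro hc
    by_cases h1 : getB ch c.1 c.2 = true
    · exact Or.inl h1
    · exact Or.inr (isound c hc (by cases h2 : getB ch c.1 c.2 with
        | false => rfl | true => exact absurd h2 h1))
  · rintro (h | h)
    · exact imono _ _ h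
    · exact (key c h).1

theorem basin_pos (g : List (List Int)) (C R : Nat) (hR : R = g.length)
    (hC1 : (g.getD 1 []).length = C) (x y : Int) (ch : List (List Bool))
    (hShp : Shp ch R C) (hxy : getB ch x y = true) :
    (part2_dfs g (R * C + 1) x y ch).1 ≠ 0 := by
  have hcnt : cnt ch ≤ R * C := cnt_le hShp
  have SA := dfs_main g C R hR hC1 (R * C + 1) x y ch hShp (by omega) hxy
  have h1 := SA.2.2.1
  have h2 := SA.2.2.2.1
  omega

-- ---- the count-difference lemma: flipped cells are counted by any Nodup list enumerating them ----

theorem cnt_flip (R C : Nat) :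
    ∀ (Δ : List (Int × Int)) (ch ch' : List (List Bool)), Shp ch R C → Shp ch' R C →
      (∀ a b, getB ch a b = true → getB ch' a b = true) → Δ.Nodup →
      (∀ p : Int × Int, (getB ch' p.1 p.2 = true ∧ getB ch p.1 p.2 = false) ↔ p ∈ Δ) →
      cnt ch = cnt ch' + Δ.length := by
  intro Δ
  induction Δ with
  | nil =>
    intro ch ch' h1 h2 hmono _ hflip
    have : ch = ch' := by
      apply chExt h1 h2
      intro a b
      cases hc : getB ch a b with
      | true => exact (hmono a b hc).symm
      | false =>
        cases hc' : getB ch' a b with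
        | false => rfl
        | true => exact absurd ((hflip (a, b)).1 ⟨hc', hc⟩) (List.not_mem_nil)
    rw [this]; simp
  | cons d Δ' ih =>
    intro ch ch' h1 h2 hmono hnd hflip
    have hd := (hflip d).2 List.mem_cons_self
    obtain ⟨hd0a, hd0b, hdR, hdC⟩ := getB_true_bounds hd.1
    have hdR' : d.1.toNat < ch.length := by rw [h1.1, ← h2.1]; exact hdR
    have hdC' : d.2.toNat < (ch.getD d.1.toNat []).length := by
      rw [shp_getD h1 (by rw [h2.1] at hdR; exact hdR)]
      rw [shp_getD h2 (by rw [h2.1] at hdR; exact hdR)] at hdC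
      exact hdC
    have hset := getB_setB hd0a hd0b hdR' hdC'
    have hcnt2 := cnt_setB hd0a hd0b hdR' hdC' hd.2
    have hShp2 := shp_setB h1 d.1 d.2
    have hmono2 : ∀ a b, getB (setB ch d.1 d.2) a b = true → getB ch' a b = true := by
      intro a b hab
      rw [hset] at hab
      rcases Bool.or_eq_true_iff.1 hab with hh | hh
      · have h3 : a = d.1 ∧ b = d.2 := of_decide_eq_true hh
        rw [h3.1, h3.2]; exact hd.1
      · exact hmono a b hh
    have hflip2 : ∀ p : Int × Int,
        (getB ch' p.1 p.2 = true ∧ getB (setB ch d.1 d.2) p.1 p.2 = false) ↔ p ∈ Δ' := by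
      intro p
      constructor
      · rintro ⟨hp1, hp2⟩
        have hpd : ¬(p.1 = d.1 ∧ p.2 = d.2) := by
          intro hh
          rw [hset, hh.1, hh.2] at hp2; simp at hp2
        have hpch : getB ch p.1 p.2 = false := by
          cases hc : getB ch p.1 p.2 with
          | false => rfl
          | true =>
            rw [hset] at hp2; simp [hc] at hp2
        have hpmem : p ∈ d :: Δ' := (hflip p).1 ⟨hp1, hpch⟩
        rcases List.mem_cons.1 hpmem with rfl | hmem
        · exact absurd ⟨rfl, rfl⟩ hpd
        · exact hmem
      · intro hp
        have hpΔ : p ∈ d :: Δ' := List.mem_cons_of_mem _ hp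
        have h3 := (hflip p).2 hpΔ
        have hpd : p ≠ d := by
          intro h; subst h; exact (List.nodup_cons.1 hnd).1 hp
        refine ⟨h3.1, ?_⟩
        rw [hset, h3.2]
        have : ¬(p.1 = d.1 ∧ p.2 = d.2) := by
          intro hh; exact hpd (Prod.ext hh.1 hh.2)
        simp [this]
    have hstep := ih (setB ch d.1 d.2) ch' hShp2 h2 hmono2 (List.nodup_cons.1 hnd).2 hflip2
    simp only [List.length_cons]
    omega

-- ---- nodup lists of in-grid cells are at most R*C long ----

theorem len_le_grid (R C : Nat) (l : List (Int × Int)) (hnd : l.Nodup)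
    (hb : ∀ p ∈ l, 0 ≤ p.1 ∧ p.1 < (R : Int) ∧ 0 ≤ p.2 ∧ p.2 < (C : Int)) :
    l.length ≤ R * C := by
  rcases Nat.eq_zero_or_pos C with hC | hC
  · cases l with
    | nil => simp
    | cons p t =>
      have := hb p List.mem_cons_self
      subst hC
      simp at this
      omega
  · set f : Int × Int → Nat := fun p => C * p.1.toNat + p.2.toNat with hf
    have hinj : ∀ x ∈ l, ∀ y ∈ l, f x = f y → x = y := by
      intro x hx y hy hxy
      obtain ⟨x1, x2, x3, x4⟩ := hb x hx
      obtain ⟨y1, y2, y3, y4⟩ := hb y hy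
      have hx2 : x.2.toNat < C := by omega
      have hy2 : y.2.toNat < C := by omega
      have h1 : f x / C = x.1.toNat := by
        simp only [hf, Nat.mul_add_div hC, Nat.div_eq_of_lt hx2, Nat.add_zero]
      have h2 : f y / C = y.1.toNat := by
        simp only [hf, Nat.mul_add_div hC, Nat.div_eq_of_lt hy2, Nat.add_zero]
      have h3 : f x % C = x.2.toNat := by
        simp only [hf, Nat.mul_add_mod, Nat.mod_eq_of_lt hx2]
      have h4 : f y % C = y.2.toNat := by
        simp only [hf, Nat.mul_add_mod, Nat.mod_eq_of_lt hy2]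
      have e1 : x.1 = y.1 := by
        have : x.1.toNat = y.1.toNat := by rw [← h1, ← h2, hxy]
        omega
      have e2 : x.2 = y.2 := by
        have : x.2.toNat = y.2.toNat := by rw [← h3, ← h4, hxy]
        omega
      exact Prod.ext e1 e2
    have hmapnd : (l.map f).Nodup := hnd.map_on hinj
    have hsub : (l.map f).toFinset ⊆ Finset.range (C * R) := by
      intro n hn
      rw [List.mem_toFinset] at hn
      obtain ⟨p, hp, rfl⟩ := List.mem_map.1 hn
      obtain ⟨p1, p2, p3, p4⟩ := hb p hp
      have hlt : C * p.1.toNat + p.2.toNat < C * R := by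
        have h5 : p.2.toNat < C := by omega
        have h6 : p.1.toNat + 1 ≤ R := by omega
        calc C * p.1.toNat + p.2.toNat < C * p.1.toNat + C := by omega
          _ = C * (p.1.toNat + 1) := by ring
          _ ≤ C * R := Nat.mul_le_mul_left _ h6
      simpa [Finset.mem_range, hf] using hlt
    have hcard := Finset.card_le_card hsub
    rw [List.toFinset_card_of_nodup hmapnd, Finset.card_range] at hcard
    have hcm : C * R = R * C := Nat.mul_comm C R
    rw [← List.length_map (f := f)]
    omega

-- ---- B side: the neighbour fold appends the same fresh cells to queue and seen ----

theorem bNbr_fold (rows cols : Int) (g : List (List Int)) :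
    ∀ (ns : List (Int × Int)) (queue seen : List (Int × Int)), seen.Nodup →
      ∃ Δ : List (Int × Int),
        ns.foldl (bNbr rows cols g) (queue, seen) = (queue ++ Δ, seen ++ Δ) ∧
        (seen ++ Δ).Nodup ∧
        (∀ p ∈ Δ, p ∈ ns ∧ 0 ≤ p.1 ∧ p.1 < rows ∧ 0 ≤ p.2 ∧ p.2 < cols ∧
          cellAt g p ≠ 9 ∧ p ∉ seen) ∧
        (∀ n ∈ ns, 0 ≤ n.1 → n.1 < rows → 0 ≤ n.2 → n.2 < cols → cellAt g n ≠ 9 →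
          n ∈ seen ++ Δ) := by
  intro ns
  induction ns with
  | nil =>
    intro queue seen hnd
    exact ⟨[], by simp, by simpa using hnd, by simp, by simp⟩
  | cons n ns ih =>
    intro queue seen hnd
    by_cases hg : 0 ≤ n.1 ∧ n.1 < rows ∧ 0 ≤ n.2 ∧ n.2 < cols ∧ cellAt g n ≠ 9 ∧ n ∉ seen
    · have hstep : bNbr rows cols g (queue, seen) n = (queue ++ [n], seen ++ [n]) := by
        simp only [bNbr]
        rw [if_pos hg, PySem.Set.add_of_not_mem hg.2.2.2.2.2]
      have hnd' : (seen ++ [n]).Nodup := by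
        rw [List.nodup_append]
        refine ⟨hnd, List.nodup_singleton n, ?_⟩
        intro a ha b hbm
        rw [List.mem_singleton] at hbm
        subst hbm
        intro h
        exact hg.2.2.2.2.2 (h ▸ ha)
      obtain ⟨Δ, he, hΔnd, hΔ, hcompl⟩ := ih (queue ++ [n]) (seen ++ [n]) hnd'
      refine ⟨[n] ++ Δ, ?_, ?_, ?_, ?_⟩
      · rw [List.foldl_cons, hstep, he]
        simp
      · simpa using hΔnd
      · intro p hp
        rcases List.mem_append.1 hp with hp | hp
        · rw [List.mem_singleton] at hp
          subst hp
          exact ⟨List.mem_cons_self, hg.1, hg.2.1, hg.2.2.1, hg.2.2.2.1, hg.2.2.2.2.1,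
            hg.2.2.2.2.2⟩
        · obtain ⟨h1, h2, h3, h4, h5, h6, h7⟩ := hΔ p hp
          refine ⟨List.mem_cons_of_mem _ h1, h2, h3, h4, h5, h6, fun hc => h7 ?_⟩
          exact List.mem_append.2 (Or.inl hc)
      · intro m hm m1 m2 m3 m4 m5
        rcases List.mem_cons.1 hm with rfl | hm'
        · simp
        · have := hcompl m hm' m1 m2 m3 m4 m5
          simpa using this
    · have hstep : bNbr rows cols g (queue, seen) n = (queue, seen) := by
        simp only [bNbr]; rw [if_neg hg]
      obtain ⟨Δ, he, hΔnd, hΔ, hcompl⟩ := ih queue seen hnd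
      refine ⟨Δ, by rw [List.foldl_cons, hstep, he], hΔnd, ?_, ?_⟩
      · intro p hp
        obtain ⟨h1, h2⟩ := hΔ p hp
        exact ⟨List.mem_cons_of_mem _ h1, h2⟩
      · intro m hm m1 m2 m3 m4 m5
        rcases List.mem_cons.1 hm with rfl | hm'
        · have hms : m ∈ seen := by
            by_contra hns
            exact hg ⟨m1, m2, m3, m4, m5, hns⟩
          exact List.mem_append.2 (Or.inl hms)
        · exact hcompl m hm' m1 m2 m3 m4 m5

-- ---- B side: the whole BFS loop ----

theorem bfs_main (g : List (List Int)) (C R : Nat) (hR : R = g.length) :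
    ∀ (fuel : Nat) (queue : List (Int × Int)) (qi : Nat) (seen : List (Int × Int)),
      seen.Nodup → (∀ p ∈ seen, goodc g C p) → qi ≤ queue.length →
      (queue.length - qi) + (R * C - seen.length) < fuel →
      ∃ Δ : List (Int × Int),
        bfs (R : Int) (C : Int) g fuel queue qi seen = (queue ++ Δ, seen ++ Δ) ∧
        (seen ++ Δ).Nodup ∧
        (∀ p ∈ Δ, goodc g C p ∧ p ∉ seen) ∧
        (∀ z ∈ Δ, ∃ s ∈ queue.drop qi, ReachS g C seen s z) ∧
        (∀ z, (z ∈ queue.drop qi ∨ z ∈ Δ) → ∀ d ∈ nbrsOf z, goodc g C d →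
          d ∈ seen ++ Δ) := by
  intro fuel
  induction fuel with
  | zero => intro queue qi seen _ _ _ hfuel; omega
  | succ fuel ih =>
    intro queue qi seen hnd hgood hqi hfuel
    by_cases hlt : qi < queue.length
    · have hstep : bfs (R : Int) (C : Int) g (fuel + 1) queue qi seen =
          bfs (R : Int) (C : Int) g fuel
            ((nbrsOf (queue.getD qi (0, 0))).foldl (bNbr (R : Int) (C : Int) g) (queue, seen)).1
            (qi + 1)
            ((nbrsOf (queue.getD qi (0, 0))).foldl (bNbr (R : Int) (C : Int) g) (queue, seen)).2 := by
        rw [bfs, if_pos hlt]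
      set c := queue.getD qi (0, 0) with hc
      obtain ⟨Δ₁, he₁, hnd₁, hΔ₁, hcompl₁⟩ :=
        bNbr_fold (R : Int) (C : Int) g (nbrsOf c) queue seen hnd
      have hΔ₁good : ∀ p ∈ Δ₁, goodc g C p := by
        intro p hp
        obtain ⟨_, h2, h3, h4, h5, h6, _⟩ := hΔ₁ p hp
        exact ⟨h2, by rw [← hR]; exact h3, h4, h5, by rwa [cellAt_eq] at h6⟩
      have hΔ₁rel : ∀ p ∈ Δ₁, relS g C seen c p := by
        intro p hp
        obtain ⟨h1, _, _, _, _, _, h7⟩ := hΔ₁ p hp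
        exact ⟨h1, hΔ₁good p hp, h7⟩
      have hgood' : ∀ p ∈ seen ++ Δ₁, goodc g C p := by
        intro p hp
        rcases List.mem_append.1 hp with hp | hp
        · exact hgood p hp
        · exact hΔ₁good p hp
      have hlen' : (seen ++ Δ₁).length ≤ R * C := by
        apply len_le_grid R C _ hnd₁
        intro p hp
        obtain ⟨h1, h2, h3, h4, _⟩ := hgood' p hp
        exact ⟨h1, by rw [hR]; exact h2, h3, h4⟩
      obtain ⟨Δ₂, he₂, hnd₂, hΔ₂, hsound₂, hclosed₂⟩ :=
        ih (queue ++ Δ₁) (qi + 1) (seen ++ Δ₁) hnd₁ hgood'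
          (by simp only [List.length_append]; omega)
          (by simp only [List.length_append] at *; omega)
      have hcq : c ∈ queue.drop qi := by
        rw [List.drop_eq_getElem_cons hlt]
        have hqc : queue[qi] = c := by rw [hc, List.getD_eq_getElem _ _ hlt]
        rw [hqc]
        exact List.mem_cons_self
      have hdropq : (queue ++ Δ₁).drop (qi + 1) = queue.drop (qi + 1) ++ Δ₁ := by
        rw [List.drop_append_of_le_length (by omega)]
      refine ⟨Δ₁ ++ Δ₂, ?_, ?_, ?_, ?_, ?_⟩
      · rw [hstep, he₁]
        simp only at he₂ ⊢
        rw [he₂, List.append_assoc, List.append_assoc]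
      · rwa [← List.append_assoc]
      · intro p hp
        rcases List.mem_append.1 hp with hp | hp
        · exact ⟨hΔ₁good p hp, (hΔ₁ p hp).2.2.2.2.2.2⟩
        · obtain ⟨h1, h2⟩ := hΔ₂ p hp
          exact ⟨h1, fun hcm => h2 (List.mem_append.2 (Or.inl hcm))⟩
      · -- soundness
        intro z hz
        rcases List.mem_append.1 hz with hz | hz
        · exact ⟨c, hcq, Relation.ReflTransGen.single (hΔ₁rel z hz)⟩
        · obtain ⟨s, hs, hreach⟩ := hsound₂ z hz
          have hreach' : ReachS g C seen s z :=
            reachS_mono (fun p hp => List.mem_append.2 (Or.inl hp)) hreach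
          rw [hdropq] at hs
          rcases List.mem_append.1 hs with hs | hs
          · refine ⟨s, ?_, hreach'⟩
            rw [List.drop_eq_getElem_cons hlt]
            exact List.mem_cons_of_mem _ hs
          · exact ⟨c, hcq, Relation.ReflTransGen.head (hΔ₁rel s hs) hreach'⟩
      · -- closedness
        have hsub : ∀ w : Int × Int, w ∈ seen ++ Δ₁ ++ Δ₂ → w ∈ seen ++ (Δ₁ ++ Δ₂) := by
          intro w hw; rwa [← List.append_assoc]
        intro z hz d hd hgd
        rcases hz with hz | hz
        · rw [List.drop_eq_getElem_cons hlt] at hz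
          have hqc : queue[qi] = c := by rw [hc, List.getD_eq_getElem _ _ hlt]
          rw [hqc] at hz
          rcases List.mem_cons.1 hz with rfl | hz'
          · -- z = c : every good neighbour is in seen ++ Δ₁ after the fold
            obtain ⟨g1, g2, g3, g4, g5⟩ := hgd
            have hdm := hcompl₁ d hd g1 (by rw [hR]; exact g2) g3 g4 (by rwa [cellAt_eq])
            have hdm2 : d ∈ seen ++ Δ₁ ++ Δ₂ := List.mem_append.2 (Or.inl hdm)
            exact hsub d hdm2
          · have hzz : z ∈ (queue ++ Δ₁).drop (qi + 1) := by
              rw [hdropq]; exact List.mem_append.2 (Or.inl hz')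
            exact hsub d (hclosed₂ z (Or.inl hzz) d hd ⟨hgd.1, hgd.2.1, hgd.2.2.1, hgd.2.2.2.1, hgd.2.2.2.2⟩)
        · rcases List.mem_append.1 hz with hz | hz
          · have hzz : z ∈ (queue ++ Δ₁).drop (qi + 1) := by
              rw [hdropq]; exact List.mem_append.2 (Or.inr hz)
            exact hsub d (hclosed₂ z (Or.inl hzz) d hd hgd)
          · exact hsub d (hclosed₂ z (Or.inr hz) d hd hgd)
    · have hstep : bfs (R : Int) (C : Int) g (fuel + 1) queue qi seen = (queue, seen) := by
        rw [bfs, if_neg hlt]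
      have hdrop : queue.drop qi = [] := List.drop_eq_nil_of_le (by omega)
      refine ⟨[], by simp [hstep], by simpa using hnd, by simp, by simp, ?_⟩
      intro z hz
      rw [hdrop] at hz
      rcases hz with hz | hz
      · cases hz
      · cases hz

theorem bfs_points (g : List (List Int)) (C R : Nat) (hR : R = g.length)
    (fuel : Nat) (x y : Int) (seen1 : List (Int × Int)) (hnd : seen1.Nodup)
    (hgood : ∀ p ∈ seen1, goodc g C p) (hmem : (x, y) ∈ seen1)
    (hfuel : 1 + (R * C - seen1.length) < fuel) :
    ∃ Δ : List (Int × Int),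
      bfs (R : Int) (C : Int) g fuel [(x, y)] 0 seen1 = ((x, y) :: Δ, seen1 ++ Δ) ∧
      (seen1 ++ Δ).Nodup ∧ (∀ p ∈ seen1 ++ Δ, goodc g C p) ∧
      (∀ c : Int × Int, c ∈ seen1 ++ Δ ↔ (c ∈ seen1 ∨ ReachS g C seen1 (x, y) c)) := by
  obtain ⟨Δ, he, hndΔ, hΔ, hsound, hclosed⟩ :=
    bfs_main g C R hR fuel [(x, y)] 0 seen1 hnd hgood (by simp) (by simpa using hfuel)
  refine ⟨Δ, by simpa using he, hndΔ, ?_, ?_⟩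
  · intro p hp
    rcases List.mem_append.1 hp with hp | hp
    · exact hgood p hp
    · exact (hΔ p hp).1
  · have key : ∀ c : Int × Int, ReachS g C seen1 (x, y) c →
        c ∈ seen1 ++ Δ ∧ ((x, y) = c ∨ c ∉ seen1) := by
      intro c h
      induction h with
      | refl => exact ⟨List.mem_append.2 (Or.inl hmem), Or.inl rfl⟩
      | tail h1 h2 ih =>
        rename_i b c'
        refine ⟨?_, Or.inr h2.2.2⟩
        rcases ih.2 with hb | hb
        · refine hclosed b (Or.inl ?_) c' h2.1 h2.2.1
          rw [← hb]; simp
        · have hbΔ : b ∈ Δ := by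
            rcases List.mem_append.1 ih.1 with hh | hh
            · exact absurd hh hb
            · exact hh
          exact hclosed b (Or.inr hbΔ) c' h2.1 h2.2.1
    intro c
    constructor
    · intro hc
      rcases List.mem_append.1 hc with hc | hc
      · exact Or.inl hc
      · obtain ⟨s, hs, hreach⟩ := hsound c hc
        simp at hs
        subst hs
        exact Or.inr hreach
    · rintro (h | h)
      · exact List.mem_append.2 (Or.inl h)
      · exact (key c h).1

-- ---- one basin: the two flood fills agree in size and in the cells they mark ----

theorem basin_all (g : List (List Int)) (C R : Nat) (hR : R = g.length)
    (hC1 : (g.getD 1 []).length = C) (x y : Int) (ch : List (List Bool))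
    (seen : List (Int × Int)) (hShp : Shp ch R C) (hnd : seen.Nodup)
    (hgood : ∀ p ∈ seen, goodc g C p)
    (hcorr : ∀ p : Int × Int, goodc g C p → (getB ch p.1 p.2 = true ↔ p ∈ seen))
    (hxy : goodc g C (x, y)) (hxyn : (x, y) ∉ seen) :
    (part2_dfs g (R * C + 1) x y (setB ch x y)).1 =
      ((bfs (R : Int) (C : Int) g (R * C + 1) [(x, y)] 0 (PySem.Set.add seen (x, y))).1.length : Int) ∧
    Shp (part2_dfs g (R * C + 1) x y (setB ch x y)).2 R C ∧
    (bfs (R : Int) (C : Int) g (R * C + 1) [(x, y)] 0 (PySem.Set.add seen (x, y))).2.Nodup ∧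
    (∀ p ∈ (bfs (R : Int) (C : Int) g (R * C + 1) [(x, y)] 0 (PySem.Set.add seen (x, y))).2,
      goodc g C p) ∧
    (∀ p : Int × Int, goodc g C p →
      (getB (part2_dfs g (R * C + 1) x y (setB ch x y)).2 p.1 p.2 = true ↔
        p ∈ (bfs (R : Int) (C : Int) g (R * C + 1) [(x, y)] 0 (PySem.Set.add seen (x, y))).2)) := by
  obtain ⟨hx0, hxR, hy0, hyC, h9⟩ := hxy
  have hxyg : goodc g C (x, y) := ⟨hx0, hxR, hy0, hyC, h9⟩
  have hiR : x.toNat < ch.length := by rw [hShp.1, hR]; omega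
  have hjC : y.toNat < (ch.getD x.toNat []).length := by
    rw [shp_getD hShp (by rw [hR]; omega)]; omega
  have hset := getB_setB hx0 hy0 hiR hjC
  have hShp1 : Shp (setB ch x y) R C := shp_setB hShp x y
  have hch1xy : getB (setB ch x y) x y = true := by rw [hset]; simp
  have hseen1e : PySem.Set.add seen (x, y) = seen ++ [(x, y)] :=
    PySem.Set.add_of_not_mem hxyn
  have hnd1 : (PySem.Set.add seen (x, y)).Nodup := by
    rw [hseen1e, List.nodup_append]
    refine ⟨hnd, List.nodup_singleton _, ?_⟩
    intro a ha b hbm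
    rw [List.mem_singleton] at hbm
    subst hbm
    intro h
    exact hxyn (h ▸ ha)
  have hgood1 : ∀ p ∈ PySem.Set.add seen (x, y), goodc g C p := by
    intro p hp
    rw [hseen1e] at hp
    rcases List.mem_append.1 hp with hp | hp
    · exact hgood p hp
    · rw [List.mem_singleton] at hp
      subst hp
      exact hxyg
  have hmem1 : (x, y) ∈ PySem.Set.add seen (x, y) := by rw [hseen1e]; simp
  have hcorr1 : ∀ p : Int × Int, goodc g C p →
      (getB (setB ch x y) p.1 p.2 = true ↔ p ∈ PySem.Set.add seen (x, y)) := by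
    intro p hp
    rw [hset p.1 p.2, hseen1e]
    constructor
    · intro h
      rcases Bool.or_eq_true_iff.1 h with hh | hh
      · have h3 : p.1 = x ∧ p.2 = y := of_decide_eq_true hh
        rw [List.mem_append, List.mem_singleton]
        exact Or.inr (Prod.ext h3.1 h3.2)
      · exact List.mem_append.2 (Or.inl ((hcorr p hp).1 hh))
    · intro h
      rcases List.mem_append.1 h with hh | hh
      · rw [(hcorr p hp).2 hh]; simp
      · rw [List.mem_singleton] at hh
        subst hh
        simp
  have hlen1 : 1 ≤ (PySem.Set.add seen (x, y)).length := by
    rw [hseen1e]; simp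
  have hRC : 0 < R * C := by
    have hx' : x.toNat < R := by omega
    have hy' : y.toNat < C := by omega
    exact Nat.mul_pos (by omega) (by omega)
  have hfuel : 1 + (R * C - (PySem.Set.add seen (x, y)).length) < R * C + 1 := by omega
  obtain ⟨Δ, heB, hndF, hgoodF, hpoints⟩ :=
    bfs_points g C R hR (R * C + 1) x y (PySem.Set.add seen (x, y)) hnd1 hgood1 hmem1 hfuel
  have hcnt1 : cnt (setB ch x y) < R * C + 1 := by
    have := cnt_le hShp1
    omega
  have SA := dfs_main g C R hR hC1 (R * C + 1) x y (setB ch x y) hShp1 hcnt1 hch1xy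
  have hApoints := dfs_points g C R hR hC1 (R * C + 1) x y (setB ch x y) hShp1 hcnt1 hch1xy
  have hreachiff := fun c => reach_iff_reachS hcorr1 (s := (x, y)) c
  have hcorrF : ∀ p : Int × Int, goodc g C p →
      (getB (part2_dfs g (R * C + 1) x y (setB ch x y)).2 p.1 p.2 = true ↔
        p ∈ (bfs (R : Int) (C : Int) g (R * C + 1) [(x, y)] 0 (PySem.Set.add seen (x, y))).2) := by
    intro p hp
    rw [heB]
    simp only
    rw [hApoints p, hpoints p, hcorr1 p hp, hreachiff p]
  refine ⟨?_, SA.1, by rw [heB]; exact hndF, by rw [heB]; exact hgoodF, hcorrF⟩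
  -- sizes
  have hΔflip : ∀ p : Int × Int,
      (getB (part2_dfs g (R * C + 1) x y (setB ch x y)).2 p.1 p.2 = true ∧
        getB (setB ch x y) p.1 p.2 = false) ↔ p ∈ Δ := by
    intro p
    constructor
    · rintro ⟨h1, h2⟩
      have hre : Reach g C (setB ch x y) (x, y) p := by
        rcases (hApoints p).1 h1 with hh | hh
        · rw [h2] at hh; cases hh
        · exact hh
      have hpg : goodc g C p := by
        rcases reach_good hre with rfl | hh
        · rw [hch1xy] at h2; cases h2
        · exact hh
      have hps : p ∉ PySem.Set.add seen (x, y) := fun hc => by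
        rw [(hcorr1 p hpg).2 hc] at h2; cases h2
      have hmm : p ∈ PySem.Set.add seen (x, y) ++ Δ :=
        (hpoints p).2 (Or.inr ((hreachiff p).1 hre))
      rcases List.mem_append.1 hmm with hh | hh
      · exact absurd hh hps
      · exact hh
    · intro hp
      have hpm : p ∈ PySem.Set.add seen (x, y) ++ Δ := List.mem_append.2 (Or.inr hp)
      have hpg : goodc g C p := hgoodF p hpm
      have hps : p ∉ PySem.Set.add seen (x, y) := by
        intro hc
        rw [List.nodup_append] at hndF
        exact hndF.2.2 p hc p hp rfl
      refine ⟨?_, ?_⟩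
      · rw [hcorrF p hpg, heB]
        exact hpm
      · cases hc : getB (setB ch x y) p.1 p.2 with
        | false => rfl
        | true => exact absurd ((hcorr1 p hpg).1 hc) hps
  have hΔnd : Δ.Nodup := (List.nodup_append.1 hndF).2.1
  have hflipcnt := cnt_flip R C Δ (setB ch x y) (part2_dfs g (R * C + 1) x y (setB ch x y)).2
    hShp1 SA.1 SA.2.1 hΔnd hΔflip
  have hsizeA := SA.2.2.2.1
  have hlenB : (bfs (R : Int) (C : Int) g (R * C + 1) [(x, y)] 0
      (PySem.Set.add seen (x, y))).1.length = Δ.length + 1 := by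
    rw [heB]; simp
  rw [hlenB]
  push_cast
  omega

-- ---- the outer scans in lockstep ----

def Corr (g : List (List Int)) (C R : Nat) (stA : List (List Bool) × List Int)
    (stB : List Int × List (Int × Int)) : Prop :=
  Shp stA.1 R C ∧ stB.2.Nodup ∧ (∀ p ∈ stB.2, goodc g C p) ∧
  (∀ p : Int × Int, goodc g C p → (getB stA.1 p.1 p.2 = true ↔ p ∈ stB.2)) ∧
  stA.2 = stB.1

theorem foldl_rel {α β γ : Type} (Rel : α → β → Prop) (f : α → γ → α) (h : β → γ → β) :
    ∀ (l : List γ) (a : α) (b : β),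
      (∀ x ∈ l, ∀ a b, Rel a b → Rel (f a x) (h b x)) → Rel a b →
      Rel (l.foldl f a) (l.foldl h b) := by
  intro l
  induction l with
  | nil => exact fun a b _ hab => hab
  | cons x t ih =>
    intro a b hstep hab
    exact ih (f a x) (h b x) (fun z hz => hstep z (List.mem_cons_of_mem _ hz))
      (hstep x List.mem_cons_self a b hab)

-- ---- the extraction steps agree ----

theorem takeMax_step (a : Int) (l : List Int) :
    (match PySem.List.max? l (fun v => v) with
      | none => (a, l)
      | some m =>
        match PySem.List.index? l m with
        | none => (a, l)
        | some i =>
          match PySem.List.pop? l (i : Int) with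
          | none => (a, l)
          | some vr => (a * vr.1, vr.2)) = (a * (takeMax l).1, (takeMax l).2) := by
  cases hm : PySem.List.max? l (fun v => v) with
  | none => simp [takeMax, hm]
  | some m =>
    have hmem : m ∈ l := PySem.List.max?_mem hm
    obtain ⟨i, hi⟩ := Option.isSome_iff_exists.1 ((PySem.List.index?_isSome_iff l m).2 hmem)
    obtain ⟨pre, suf, hsplit, hlen, hpre⟩ := (PySem.List.index?_eq_some_iff l m i).1 hi
    have hilt : i < l.length := by rw [hsplit, List.length_append, ← hlen]; simp
    have hpop := PySem.List.pop?_natCast (xs := l) (n := i) hilt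
    have hgeti : l[i] = m := by
      obtain ⟨hk, hkm, _⟩ := PySem.List.getElem_of_index?_eq_some hi
      exact hkm
    have herase : l.eraseIdx i = l.erase m := by
      rw [hsplit, ← hlen]
      rw [List.eraseIdx_append_of_length_le (le_refl _)]
      simp only [Nat.sub_self, List.eraseIdx_cons_zero]
      rw [List.erase_append_right _ hpre, List.erase_cons_head]
    have hrem : PySem.List.remove? l m = some (l.erase m) := PySem.List.remove?_eq_some_erase l m hmem
    simp only [takeMax, hm, hi, hpop, hrem]
    rw [hgeti, herase]
    rfl

theorem top3_eq (l : List Int) :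
    top3 l = (takeMax l).1 * (takeMax (takeMax l).2).1 *
      (match PySem.List.max? (takeMax (takeMax l).2).2 (fun v => v) with
        | none => (1 : Int)
        | some m => m) := by
  have hthird : ∀ l' : List Int,
      (match PySem.List.max? l' (fun v => v) with
        | none => (1 : Int)
        | some m => m) = (takeMax l').1 := by
    intro l'
    cases hm : PySem.List.max? l' (fun v => v) with
    | none => simp [takeMax, hm]
    | some m => simp [takeMax, hm]
  rw [hthird]
  unfold top3
  have hr3 : List.range 3 = [0, 1, 2] := by decide
  rw [hr3]
  simp only [List.foldl_cons, List.foldl_nil]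
  rw [takeMax_step, takeMax_step, takeMax_step]
  ring

theorem getB_replicate (R C : Nat) (a b : Int) :
    getB (List.replicate R (List.replicate C false)) a b = false := by
  by_cases hA : a.toNat < R
  · have h1 : (List.replicate R (List.replicate C false)).getD a.toNat [] =
        List.replicate C false := by
      rw [List.getD_eq_getElem _ _ (by simpa using hA)]
      simp
    have h2 : (List.replicate C false).getD b.toNat false = false := by
      by_cases hB : b.toNat < C
      · rw [List.getD_eq_getElem _ _ (by simpa using hB)]
        simp
      · rw [List.getD_eq_getElem?_getD, List.getElem?_eq_none (by simpa using hB)]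
        rfl
    unfold getB
    split
    · rw [h1, h2]
    · rfl
  · have h1 : (List.replicate R (List.replicate C false)).getD a.toNat [] = [] := by
      rw [List.getD_eq_getElem?_getD, List.getElem?_eq_none (by simpa using hA)]
      rfl
    unfold getB
    split
    · rw [h1]
      rfl
    · rfl

-- the two scans produce the same basin list and corresponding marking states
theorem scan_corr (input : List (List Int)) (hrows : 2 ≤ input.length)
    (hrect : ∀ r ∈ input, r.length = (input.getD 0 []).length) :
    Corr input (input.getD 0 []).length input.length
      ((List.range input.length).foldl (fun st x =>
          (List.range (input.getD 0 []).length).foldl (fun st y =>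
            if gA input x y = 9 then (setB st.1 x y, st.2)
            else if getB st.1 x y = false then
              let ch1 := setB st.1 x y
              let r := part2_dfs input (input.length * (input.getD 0 []).length + 1) x y ch1
              (r.2, if r.1 ≠ 0 then st.2 ++ [r.1] else st.2)
            else st) st)
        (List.replicate input.length (List.replicate (input.getD 0 []).length false),
          ([] : List Int)))
      ((List.range input.length).foldl (fun st x =>
          (List.range (input.getD 0 []).length).foldl (fun st y =>
            if cellAt input ((x : Int), (y : Int)) ≠ 9 ∧ ((x : Int), (y : Int)) ∉ st.2 then
              let r := bfs (input.length : Int) ((input.getD 0 []).length : Int) input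
                (input.length * (input.getD 0 []).length + 1)
                [((x : Int), (y : Int))] 0 (PySem.Set.add st.2 ((x : Int), (y : Int)))
              (st.1 ++ [(r.1.length : Int)], r.2)
            else st) st)
        (([] : List Int), (PySem.Set.empty : PySem.Set (Int × Int)))) := by
  have h1R : 1 < input.length := by omega
  have hC1 : (input.getD 1 []).length = (input.getD 0 []).length := by
    rw [List.getD_eq_getElem _ _ h1R]
    exact hrect _ (List.getElem_mem h1R)
  set R := input.length with hRdef
  set C := (input.getD 0 []).length with hCdef
  apply foldl_rel (Corr input C R)
  · -- one row of the scan
    intro x hx stA stB hst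
    obtain ⟨x', hxR, rfl⟩ : ∃ a, a < R ∧ x = (a : Int) := by simpa using hx
    apply foldl_rel (Corr input C R)
    · -- one cell of the scan
      intro y hy sA sB hs
      obtain ⟨y', hyC, rfl⟩ : ∃ a, a < C ∧ y = (a : Int) := by simpa using hy
      obtain ⟨hShp, hnd, hgood, hcorr, hbas⟩ := hs
      have hiR : (x' : Int).toNat < sA.1.length := by rw [hShp.1]; simpa using hxR
      have hjC : (y' : Int).toNat < (sA.1.getD (x' : Int).toNat []).length := by
        rw [shp_getD hShp (by simpa using hxR)]; simpa using hyC
      by_cases h9 : gA input (x' : Int) (y' : Int) = 9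
      · rw [if_pos h9, if_neg (by rw [cellAt_eq]; simp [h9])]
        refine ⟨shp_setB hShp _ _, hnd, hgood, ?_, hbas⟩
        intro p hp
        rw [getB_setB (Int.natCast_nonneg x') (Int.natCast_nonneg y') hiR hjC]
        have hpne : ¬(p.1 = (x' : Int) ∧ p.2 = (y' : Int)) := by
          rintro ⟨h1, h2⟩
          have h3 := hp.2.2.2.2
          rw [h1, h2] at h3
          exact h3 h9
        simp only [hpne, decide_false, Bool.false_or]
        exact hcorr p hp
      · have hxygood : goodc input C ((x' : Int), (y' : Int)) := by
          refine ⟨Int.natCast_nonneg x', ?_, Int.natCast_nonneg y', ?_, h9⟩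
          · show (x' : Int) < (input.length : Int)
            exact_mod_cast hxR
          · show (y' : Int) < (C : Int)
            exact_mod_cast hyC
        by_cases hchk : ((x' : Int), (y' : Int)) ∈ sB.2
        · have hgb : getB sA.1 (x' : Int) (y' : Int) = true :=
            (hcorr _ hxygood).2 hchk
          rw [if_neg h9, if_neg (by simp [hgb]), if_neg (by rw [cellAt_eq]; simp [hchk])]
          exact ⟨hShp, hnd, hgood, hcorr, hbas⟩
        · have hgb : getB sA.1 (x' : Int) (y' : Int) = false := by
            cases hc : getB sA.1 (x' : Int) (y' : Int) with
            | false => rfl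
            | true => exact absurd ((hcorr _ hxygood).1 hc) hchk
          rw [if_neg h9, if_pos hgb, if_pos (by rw [cellAt_eq]; exact ⟨h9, hchk⟩)]
          obtain ⟨hsz, hShpF, hndF, hgoodF, hcorrF⟩ :=
            basin_all input C R rfl hC1 (x' : Int) (y' : Int) sA.1 sB.2
              hShp hnd hgood hcorr hxygood hchk
          have hpos : (part2_dfs input (R * C + 1) (x' : Int) (y' : Int)
              (setB sA.1 (x' : Int) (y' : Int))).1 ≠ 0 := by
            apply basin_pos input C R rfl hC1
            · exact shp_setB hShp _ _
            · rw [getB_setB (Int.natCast_nonneg x') (Int.natCast_nonneg y') hiR hjC]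
              simp
          refine ⟨hShpF, hndF, hgoodF, hcorrF, ?_⟩
          dsimp only
          rw [if_pos hpos, hbas, hsz]
    · exact hst
  · -- the initial states correspond
    refine ⟨⟨by simp, ?_⟩, List.nodup_nil, by simp, ?_, rfl⟩
    · intro r hr
      rw [List.eq_of_mem_replicate hr]
      simp
    · intro p _
      constructor
      · intro h
        rw [getB_replicate] at h
        cases h
      · intro h
        simp [PySem.Set.empty] at h

-- ===== VERDICT (by name: the statement is the Claim_ definition above) =====
theorem part2_spec : Claim_equal_part2 := by
  intro input _ hpre
  obtain ⟨hrows, hrect, _⟩ := hpre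
  have hkey := scan_corr input hrows hrect
  obtain ⟨_, _, _, _, hbas⟩ := hkey
  unfold Spec_part2 part2 part2_alt
  rw [top3_eq, hbas]
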